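-- pv_equiv track=rewrite | github.com/carlos-aug/algorithms | challenges/challenge_study_schedule.py | study_schedule
-- ===== SOURCE A (Python) =====
-- def study_schedule(permanence_period, target_time):
--     count_hour = 0
--     if not target_time:
--         return None
--
--     for i, j in permanence_period:
--         if not i or not j or type(i) == str or type(j) == str:
--             return None
--         elif target_time >= i and target_time <= j:
--             count_hour += 1
--
--     return count_hour
-- ===== SOURCE B (Python) =====
-- def study_schedule(permanence_period, target_time):
--     if not target_time:
--         return None
--     if any(not i or not j or type(i) == str or type(j) == str
--            for i, j in permanence_period):
--         return None
--     return sum(1 for i, j in permanence_period if i <= target_time <= j)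
-- ===== Notes on version B (the rewrite author's own statement) =====
-- stated objective: simpler
-- what changed: The single interleaved early-return loop is split into two separate passes: an any() validation pass over all entries, then a sum() counting pass; correct because an invalid entry makes the result None regardless of where it occurs.
import Mathlib
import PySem

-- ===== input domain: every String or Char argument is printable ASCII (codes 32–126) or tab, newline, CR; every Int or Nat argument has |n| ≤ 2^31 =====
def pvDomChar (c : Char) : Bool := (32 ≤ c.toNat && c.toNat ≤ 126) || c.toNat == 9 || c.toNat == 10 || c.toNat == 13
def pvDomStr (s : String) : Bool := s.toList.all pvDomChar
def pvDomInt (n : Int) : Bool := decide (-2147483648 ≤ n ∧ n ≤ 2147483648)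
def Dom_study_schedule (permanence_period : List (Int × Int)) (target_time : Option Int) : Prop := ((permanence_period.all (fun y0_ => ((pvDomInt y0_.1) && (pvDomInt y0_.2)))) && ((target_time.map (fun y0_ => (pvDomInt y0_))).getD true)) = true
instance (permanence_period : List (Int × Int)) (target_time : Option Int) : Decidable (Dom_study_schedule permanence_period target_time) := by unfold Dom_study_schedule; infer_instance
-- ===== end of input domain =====

-- B splits A's single early-return loop into two passes (validate-all, then count-all); simpler; same value everywhere.

-- ===== PORT A =====
-- the for-loop with early return: carries count_hour, returns none on an invalid entry
def studyLoopA (t : Int) : List (Int × Int) → Int → Option Int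
  | [], c => some c
  | (i, j) :: rest, c =>
      if i = 0 ∨ j = 0 then none
      else studyLoopA t rest (if i ≤ t ∧ t ≤ j then c + 1 else c)

def study_schedule (permanence_period : List (Int × Int)) (target_time : Option Int) : Option Int :=
  match target_time with
  | none => none
  | some t => if t = 0 then none else studyLoopA t permanence_period 0

-- ===== PORT B =====
def study_schedule_alt (permanence_period : List (Int × Int)) (target_time : Option Int) : Option Int :=
  match target_time with
  | none => none
  | some t =>
      if t = 0 then none
      else if permanence_period.any (fun p => p.1 = 0 ∨ p.2 = 0) then none
      else some (permanence_period.foldl (fun acc p => if p.1 ≤ t ∧ t ≤ p.2 then acc + 1 else acc) 0)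

-- ===== PRECONDITION & SPEC =====
def Spec_study_schedule (permanence_period : List (Int × Int)) (target_time : Option Int) (out : Option Int) : Prop := out = study_schedule_alt permanence_period target_time
instance (permanence_period : List (Int × Int)) (target_time : Option Int) (out : Option Int) : Decidable (Spec_study_schedule permanence_period target_time out) := by unfold Spec_study_schedule; infer_instance

-- ===== CLAIM (what is proved, stated in full; the proofs are below) =====
def Claim_equal_study_schedule : Prop := ∀ (permanence_period : List (Int × Int)) (target_time : Option Int), Dom_study_schedule permanence_period target_time → Spec_study_schedule permanence_period target_time (study_schedule permanence_period target_time)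

-- ===== LEMMAS AND PROOFS =====
theorem studyLoopA_eq (t : Int) (pp : List (Int × Int)) (c : Int) :
    studyLoopA t pp c =
      if pp.any (fun p => p.1 = 0 ∨ p.2 = 0) then none
      else some (pp.foldl (fun acc p => if p.1 ≤ t ∧ t ≤ p.2 then acc + 1 else acc) c) := by
  induction pp generalizing c with
  | nil => simp [studyLoopA]
  | cons hd tl ih =>
      obtain ⟨i, j⟩ := hd
      by_cases hz : i = 0 ∨ j = 0
      · simp [studyLoopA, hz]
      · simp only [studyLoopA, hz, List.any_cons, ih]
        rw [decide_false, Bool.false_or, if_false, List.foldl_cons]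

-- ===== VERDICT (by name: the statement is the Claim_ definition above) =====
theorem study_schedule_spec : Claim_equal_study_schedule := by
  intro pp tt _
  unfold Spec_study_schedule study_schedule study_schedule_alt
  cases tt with
  | none => rfl
  | some t =>
      by_cases ht : t = 0
      · simp [ht]
      · simp [ht, studyLoopA_eq]
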